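-- pv_equiv track=rewrite | github.com/carloterzaghi/Discord_Bot_Kurami | artefatos_genshin/def_artefato.py | defePorcentoHeroes_artefato
-- ===== SOURCE A (Python) =====
-- def defePorcentoHeroes_artefato(nome):
--     if nome == "Vazio":
--         return ""
--     defe = ''
--     pegar = 'nao'
--     for i in nome:
--         if i == "D":
--             pegar = 'sim'
--         elif i == '.' and pegar == 'sim':
--             defe = defe + i
--         elif i.isnumeric() == False:
--             pegar = 'nao'
--         elif pegar == 'sim':
--             defe = defe + i
--     if defe == '':
--         defe = '0'
--     return defe
-- ===== SOURCE B (Python) =====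
-- def _num_prefix(seg):
--     out = ''
--     for c in seg:
--         if c == '.' or c.isnumeric():
--             out = out + c
--         else:
--             break
--     return out
--
--
-- def defePorcentoHeroes_artefato(nome):
--     if nome == "Vazio":
--         return ""
--     defe = ''.join(_num_prefix(seg) for seg in nome.split('D')[1:])
--     return defe if defe != '' else '0'
-- ===== Notes on version B (the rewrite author's own statement) =====
-- stated objective: alternative
-- what changed: Replaced the single-pass capture-flag ('sim'/'nao') state machine by a split-then-take-prefix decomposition: split the name on 'D', and concatenate from each following segment its leading run of '.'/numeric characters.
import Mathlib
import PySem

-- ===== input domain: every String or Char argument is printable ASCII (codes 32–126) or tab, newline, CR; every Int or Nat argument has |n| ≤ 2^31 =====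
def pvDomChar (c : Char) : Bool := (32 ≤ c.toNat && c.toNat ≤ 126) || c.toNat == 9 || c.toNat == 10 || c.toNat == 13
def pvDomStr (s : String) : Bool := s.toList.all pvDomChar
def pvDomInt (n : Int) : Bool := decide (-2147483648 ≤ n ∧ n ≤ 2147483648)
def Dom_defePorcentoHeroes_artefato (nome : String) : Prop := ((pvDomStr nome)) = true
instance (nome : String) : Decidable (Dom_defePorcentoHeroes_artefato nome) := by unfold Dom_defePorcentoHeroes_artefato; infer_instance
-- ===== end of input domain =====

-- B replaces A's capture-flag state machine by split-on-'D' + numeric-prefix-per-segment (alternative decomposition, same cost).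
-- `i.isnumeric()` is ported as PySem.Chars.isdigit, exact on the printable-ASCII domain Dom_.

-- ===== PORT A =====
-- the for-loop of A: state (defe, pegar), branches in A's order
def pvLoopA : List Char → List Char → String → List Char
  | [], defe, _ => defe
  | i :: rest, defe, pegar =>
    if i = 'D' then pvLoopA rest defe "sim"
    else if i = '.' ∧ pegar = "sim" then pvLoopA rest (defe ++ [i]) pegar
    else if PySem.Chars.isdigit i = false then pvLoopA rest defe "nao"
    else if pegar = "sim" then pvLoopA rest (defe ++ [i]) pegar
    else pvLoopA rest defe pegar

def defePorcentoHeroes_artefato (nome : String) : String :=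
  if nome = "Vazio" then ""
  else
    let defe := pvLoopA nome.toList [] "nao"
    if defe = [] then "0" else String.ofList defe

-- ===== PORT B =====
-- _num_prefix: the for-with-break of Source B
def pvNumPrefix : List Char → List Char
  | [] => []
  | c :: cs => if c = '.' ∨ PySem.Chars.isdigit c then c :: pvNumPrefix cs else []

def defePorcentoHeroes_artefato_alt (nome : String) : String :=
  if nome = "Vazio" then ""
  else
    -- nome.split('D')[1:], take each segment's numeric prefix, ''.join
    let defe := (((List.splitOn 'D' nome.toList).drop 1).map pvNumPrefix).flatten
    if defe = [] then "0" else String.ofList defe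

-- ===== PRECONDITION & SPEC =====
def Spec_defePorcentoHeroes_artefato (nome : String) (out : String) : Prop := out = defePorcentoHeroes_artefato_alt nome
instance (nome : String) (out : String) : Decidable (Spec_defePorcentoHeroes_artefato nome out) := by unfold Spec_defePorcentoHeroes_artefato; infer_instance

-- ===== CLAIM (what is proved, stated in full; the proofs are below) =====
def Claim_equal_defePorcentoHeroes_artefato : Prop := ∀ (nome : String), Dom_defePorcentoHeroes_artefato nome → Spec_defePorcentoHeroes_artefato nome (defePorcentoHeroes_artefato nome)

-- ===== LEMMAS AND PROOFS =====

-- B's body on a char list ("skip" state of A) and its "capture" counterpart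
def pvH (cs : List Char) : List Char :=
  (((List.splitOn 'D' cs).drop 1).map pvNumPrefix).flatten

def pvS (cs : List Char) : List Char :=
  pvNumPrefix ((List.splitOn 'D' cs).headI) ++ pvH cs

lemma pvSplit_ne_nil (cs : List Char) : List.splitOn 'D' cs ≠ [] :=
  List.splitOnP_ne_nil _ _

lemma pvLoop_eq (cs : List Char) : ∀ defe,
    pvLoopA cs defe "nao" = defe ++ pvH cs ∧
    pvLoopA cs defe "sim" = defe ++ pvS cs := by
  induction cs with
  | nil =>
      intro defe
      simp [pvLoopA, pvH, pvS, List.splitOn, List.splitOnP_nil, pvNumPrefix]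
  | cons c cs ih =>
      intro defe
      obtain ⟨h, t, e⟩ := List.exists_cons_of_ne_nil (pvSplit_ne_nil cs)
      have e' : List.splitOnP (· == 'D') cs = h :: t := e
      by_cases hD : c = 'D'
      · subst hD
        constructor
        · simp only [pvLoopA, (ih defe).2]
          simp [pvH, pvS, List.splitOn, List.splitOnP_cons, e']
        · simp only [pvLoopA, (ih defe).2]
          simp [pvS, pvH, List.splitOn, List.splitOnP_cons, e', pvNumPrefix]
      · have hsplit : List.splitOn 'D' (c :: cs) = (c :: h) :: t := by
          simp [List.splitOn, List.splitOnP_cons, hD, e']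
        by_cases hdot : c = '.'
        · subst hdot
          have hdig : PySem.Chars.isdigit '.' = false := by decide
          constructor
          · simp only [pvLoopA]
            rw [if_neg (by decide), if_neg (by simp), if_pos (by simp [hdig])]
            rw [(ih defe).1]
            simp [pvH, hsplit, e]
          · simp only [pvLoopA]
            rw [if_neg (by decide), if_pos (by simp), (ih (defe ++ ['.'])).2]
            simp [pvS, pvH, hsplit, e, pvNumPrefix]
        · by_cases hdig : PySem.Chars.isdigit c = true
          · constructor
            · simp only [pvLoopA]
              rw [if_neg hD, if_neg (by simp [hdot]), if_neg (by simp [hdig]),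
                if_neg (by simp), (ih defe).1]
              simp [pvH, hsplit, e]
            · simp only [pvLoopA]
              rw [if_neg hD, if_neg (by simp [hdot]), if_neg (by simp [hdig]),
                if_pos trivial, (ih (defe ++ [c])).2]
              simp [pvS, pvH, hsplit, e, pvNumPrefix, hdot, hdig]
          · have hdig' : PySem.Chars.isdigit c = false := by
              simpa using hdig
            constructor
            · simp only [pvLoopA]
              rw [if_neg hD, if_neg (by simp [hdot]), if_pos (by simp [hdig']),
                (ih defe).1]
              simp [pvH, hsplit, e]
            · simp only [pvLoopA]
              rw [if_neg hD, if_neg (by simp [hdot]), if_pos (by simp [hdig']),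
                (ih defe).1]
              simp [pvS, pvH, hsplit, e, pvNumPrefix, hdot, hdig']

-- ===== VERDICT (by name: the statement is the Claim_ definition above) =====
theorem defePorcentoHeroes_artefato_spec : Claim_equal_defePorcentoHeroes_artefato := by
  unfold Claim_equal_defePorcentoHeroes_artefato
  intro nome _
  unfold Spec_defePorcentoHeroes_artefato
  unfold defePorcentoHeroes_artefato defePorcentoHeroes_artefato_alt
  by_cases hV : nome = "Vazio"
  · simp [hV]
  · simp only [if_neg hV]
    have := (pvLoop_eq nome.toList []).1
    simp only [List.nil_append] at this
    rw [this]
    rfl
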